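-- pv_equiv track=rewrite | github.com/InfoSecInnovations/chainsmith-recon | app/lib/parsing.py | extract_security_headers
-- ===== SOURCE A (Python) =====
-- from typing import Any, Optional
--
-- def extract_headers_dict(raw_headers: dict[str, str]) -> dict[str, str]:
--     """
--     Normalize headers to lowercase keys.
--     """
--     return {k.lower(): v for k, v in raw_headers.items()}
--
-- def extract_security_headers(headers: dict[str, str]) -> dict[str, Optional[str]]:
--     """
--     Extract presence/value of common security headers.
--
--     Returns a dict where missing headers have None as value.
--     """
--     normalized = extract_headers_dict(headers)
--     security_headers = [
--         "strict-transport-security",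
--         "content-security-policy",
--         "x-content-type-options",
--         "x-frame-options",
--         "referrer-policy",
--         "permissions-policy",
--         "x-xss-protection",
--         "cache-control",
--     ]
--     return {h: normalized.get(h) for h in security_headers}
-- ===== SOURCE B (Python) =====
-- _SECURITY_HEADERS = (
--     "strict-transport-security",
--     "content-security-policy",
--     "x-content-type-options",
--     "x-frame-options",
--     "referrer-policy",
--     "permissions-policy",
--     "x-xss-protection",
--     "cache-control",
-- )
--
-- def extract_security_headers(headers):
--     """Single pass over the input headers into a result seeded with None defaults."""
--     result = {h: None for h in _SECURITY_HEADERS}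
--     wanted = set(_SECURITY_HEADERS)
--     for k, v in headers.items():
--         key = k.lower()
--         if key in wanted:
--             result[key] = v
--     return result
-- ===== Notes on version B (the rewrite author's own statement) =====
-- stated objective: alternative
-- what changed: B drops A's intermediate fully-normalized dict: it seeds the 8-name result with None defaults and makes one pass over the input items, lowercasing each key and storing it only if it is a wanted security header.
import Mathlib
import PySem

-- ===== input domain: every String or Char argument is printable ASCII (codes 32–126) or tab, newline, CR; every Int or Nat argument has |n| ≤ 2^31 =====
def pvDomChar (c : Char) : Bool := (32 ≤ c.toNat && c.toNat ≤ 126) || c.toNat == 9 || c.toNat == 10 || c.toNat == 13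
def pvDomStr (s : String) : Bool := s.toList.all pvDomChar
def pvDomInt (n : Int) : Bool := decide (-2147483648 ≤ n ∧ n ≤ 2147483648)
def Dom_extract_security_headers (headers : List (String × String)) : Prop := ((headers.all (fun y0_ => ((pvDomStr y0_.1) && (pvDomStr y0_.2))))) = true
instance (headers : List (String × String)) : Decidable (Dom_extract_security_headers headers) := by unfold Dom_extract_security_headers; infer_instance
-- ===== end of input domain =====

-- B seeds the 8-name result with None and fills it in one pass over the input, instead of A's intermediate fully-normalized dict (objective: alternative).

-- ===== PORT A =====
def pvSecurityNames : List String :=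
  ["strict-transport-security", "content-security-policy", "x-content-type-options",
   "x-frame-options", "referrer-policy", "permissions-policy", "x-xss-protection",
   "cache-control"]

def extract_headers_dict (raw_headers : List (String × String)) : PySem.Dict String String :=
  raw_headers.foldl (fun d p => d.insert (PySem.Str.lower p.1) p.2) PySem.Dict.empty

def extract_security_headers (headers : List (String × String)) : List (String × Option String) :=
  let normalized := extract_headers_dict headers
  pvSecurityNames.map (fun h => (h, normalized.get? h))

-- ===== PORT B =====
def pvSecHeadersB : List String :=
  ["strict-transport-security", "content-security-policy", "x-content-type-options",
   "x-frame-options", "referrer-policy", "permissions-policy", "x-xss-protection",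
   "cache-control"]

-- wanted = set(_SECURITY_HEADERS)
def pvWantedB : PySem.Set String := PySem.Set.ofList pvSecHeadersB

-- result = {h: None for h in _SECURITY_HEADERS}
def pvSeedB : PySem.Dict String (Option String) :=
  pvSecHeadersB.foldl (fun d h => d.insert h none) PySem.Dict.empty

-- for k, v in headers.items(): key = k.lower(); if key in wanted: result[key] = v
def extract_security_headers_alt (headers : List (String × String)) : List (String × Option String) :=
  (headers.foldl (fun d p =>
      let key := PySem.Str.lower p.1
      if pvWantedB.contains key then d.insert key (some p.2) else d) pvSeedB).items

-- ===== PRECONDITION & SPEC =====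
def Spec_extract_security_headers (headers : List (String × String)) (out : List (String × Option String)) : Prop := out = extract_security_headers_alt headers
instance (headers : List (String × String)) (out : List (String × Option String)) : Decidable (Spec_extract_security_headers headers out) := by unfold Spec_extract_security_headers; infer_instance

-- ===== CLAIM (what is proved, stated in full; the proofs are below) =====
def Claim_equal_extract_security_headers : Prop := ∀ (headers : List (String × String)), Dom_extract_security_headers headers → Spec_extract_security_headers headers (extract_security_headers headers)

-- ===== LEMMAS AND PROOFS =====
-- A's dict lookup equals the last matching item of the input (reverse find), if any.
theorem pvFoldl_insert_get? (hs : List (String × String)) (h : String)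
    (d : PySem.Dict String String) :
    (hs.foldl (fun d p => d.insert (PySem.Str.lower p.1) p.2) d).get? h
      = ((hs.reverse.find? (fun p => PySem.Str.lower p.1 == h)).map (·.2)).or (d.get? h) := by
  induction hs generalizing d with
  | nil => simp
  | cons p rest ih =>
    simp only [List.foldl_cons, List.reverse_cons, List.find?_append, ih]
    cases hf : rest.reverse.find? (fun p => PySem.Str.lower p.1 == h) with
    | some r => simp
    | none =>
      simp only [Option.none_or, List.find?_singleton]
      by_cases hk : PySem.Str.lower p.1 = h
      · subst hk
        simp [PySem.Dict.get?_insert_self]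
      · rw [PySem.Dict.get?_insert_of_ne _ _ (fun he => hk he.symm)]
        simp [hk]

-- The value B ends with at name h: the last match in hs, else the seed value g h.
def pvFinal (hs : List (String × String)) (g : String → Option String) (h : String) : Option String :=
  ((hs.reverse.find? (fun p => PySem.Str.lower p.1 == h)).map (fun p => some p.2)).getD (g h)

-- Inserting at an existing key updates the pair in place in a map-shaped dict.
theorem pvInsert_map_shape (g : String → Option String) (k : String) (v : Option String)
    (hk : k ∈ pvSecHeadersB) :
    (PySem.Dict.mk (pvSecHeadersB.map (fun h => (h, g h)))).insert k v
      = PySem.Dict.mk (pvSecHeadersB.map (fun h => (h, if h = k then v else g h))) := by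
  have hc : (PySem.Dict.mk (pvSecHeadersB.map (fun h => (h, g h)))).contains k := by
    simp only [PySem.Dict.contains_mk, List.any_map]
    exact List.any_eq_true.mpr ⟨k, hk, by simp⟩
  apply PySem.Dict.ext
  rw [PySem.Dict.items_insert_of_contains _ _ hc]
  simp only [List.map_map]
  refine List.map_congr_left (fun h _ => ?_)
  by_cases he : h = k <;> simp [he]

-- B's fold over a map-shaped seed stays map-shaped, with pvFinal values.
theorem pvFoldB_items (hs : List (String × String)) (g : String → Option String) :
    (hs.foldl (fun d p =>
        let key := PySem.Str.lower p.1
        if pvWantedB.contains key then d.insert key (some p.2) else d)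
      (PySem.Dict.mk (pvSecHeadersB.map (fun h => (h, g h))))).items
      = pvSecHeadersB.map (fun h => (h, pvFinal hs g h)) := by
  induction hs generalizing g with
  | nil => simp [pvFinal]
  | cons p rest ih =>
    simp only [List.foldl_cons]
    by_cases hw : pvWantedB.contains (PySem.Str.lower p.1) = true
    · have hk : PySem.Str.lower p.1 ∈ pvSecHeadersB := by
        have hm := (PySem.Set.contains_iff _ _).mp hw
        simpa [pvWantedB, PySem.Set.mem_ofList] using hm
      rw [if_pos hw, pvInsert_map_shape g _ _ hk, ih]
      refine List.map_congr_left (fun h _ => ?_)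
      simp only [pvFinal, List.reverse_cons, List.find?_append]
      cases hf : rest.reverse.find? (fun p => PySem.Str.lower p.1 == h) with
      | some r => simp
      | none =>
        simp only [Option.none_or, List.find?_singleton]
        by_cases he : PySem.Str.lower p.1 = h
        · simp [he]
        · have he' : ¬ h = PySem.Str.lower p.1 := fun hh => he hh.symm
          simp [he, he']
    · rw [if_neg hw, ih]
      refine List.map_congr_left (fun h hmem => ?_)
      simp only [pvFinal, List.reverse_cons, List.find?_append]
      cases hf : rest.reverse.find? (fun p => PySem.Str.lower p.1 == h) with
      | some r => simp
      | none =>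
        simp only [Option.none_or, List.find?_singleton]
        have he : PySem.Str.lower p.1 ≠ h := by
          intro heq
          exact hw (heq ▸ (PySem.Set.contains_iff _ _).mpr ((PySem.Set.mem_ofList _ _).mpr hmem))
        simp [he]

-- The seed dict is the map-shaped dict with all-None values.
theorem pvSeedB_eq : pvSeedB = PySem.Dict.mk (pvSecHeadersB.map (fun h => (h, (none : Option String)))) := rfl

-- ===== VERDICT (by name: the statement is the Claim_ definition above) =====
theorem extract_security_headers_spec : Claim_equal_extract_security_headers := by
  intro headers _
  unfold Spec_extract_security_headers extract_security_headers extract_security_headers_alt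
    extract_headers_dict
  rw [pvSeedB_eq, pvFoldB_items]
  have hnames : pvSecurityNames = pvSecHeadersB := rfl
  rw [hnames]
  refine List.map_congr_left (fun h _ => ?_)
  rw [pvFoldl_insert_get? headers h PySem.Dict.empty]
  simp only [PySem.Dict.get?_empty, pvFinal]
  cases headers.reverse.find? (fun p => PySem.Str.lower p.1 == h) <;> simp
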